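-- pv_equiv track=rewrite | github.com/giovinco0807/pineapple | ai/training/generate_data_fast.py | _quick_check_straight
-- ===== SOURCE A (Python) =====
-- def _quick_check_straight(sorted_ranks: list, jokers: int) -> bool:
--     """Check if ranks can form a straight (with jokers)."""
--     if len(sorted_ranks) + jokers < 5:
--         return False
--     unique = sorted(set(sorted_ranks), reverse=True)
--     # Check A-high straight: A K Q J T
--     if 14 in unique:
--         unique_with_low = unique + [1]
--     else:
--         unique_with_low = unique
--
--     for start_idx in range(len(unique_with_low)):
--         high = unique_with_low[start_idx]
--         needed = 0
--         for i in range(5):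
--             if (high - i) not in unique_with_low:
--                 needed += 1
--         if needed <= jokers:
--             return True
--     return False
-- ===== SOURCE B (Python) =====
-- def _quick_check_straight(sorted_ranks: list, jokers: int) -> bool:
--     """Check if ranks can form a straight (with jokers)."""
--     if not sorted_ranks or len(sorted_ranks) + jokers < 5:
--         return False
--     ranks = set(sorted_ranks)
--     if 14 in ranks:
--         ranks.add(1)
--     asc = sorted(ranks)
--     best = 0
--     r = 0
--     for l in range(len(asc)):
--         if r < l:
--             r = l
--         while r + 1 < len(asc) and asc[r + 1] - asc[l] <= 4:
--             r += 1
--         if r - l + 1 > best: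
--             best = r - l + 1
--     return 5 - best <= jokers
-- ===== Notes on version B (the rewrite author's own statement) =====
-- stated objective: alternative
-- what changed: A tries every unique rank as the high card of a straight and redoes five linear membership scans of the unique list for each; B sorts the unique ranks once and runs a single two-pointer sliding window over them, tracking the best count of distinct ranks within any span of 5, and returns True iff 5 - best <= jokers (with a natural no-real-cards guard giving False on an empty hand, as A does).
import Mathlib
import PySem

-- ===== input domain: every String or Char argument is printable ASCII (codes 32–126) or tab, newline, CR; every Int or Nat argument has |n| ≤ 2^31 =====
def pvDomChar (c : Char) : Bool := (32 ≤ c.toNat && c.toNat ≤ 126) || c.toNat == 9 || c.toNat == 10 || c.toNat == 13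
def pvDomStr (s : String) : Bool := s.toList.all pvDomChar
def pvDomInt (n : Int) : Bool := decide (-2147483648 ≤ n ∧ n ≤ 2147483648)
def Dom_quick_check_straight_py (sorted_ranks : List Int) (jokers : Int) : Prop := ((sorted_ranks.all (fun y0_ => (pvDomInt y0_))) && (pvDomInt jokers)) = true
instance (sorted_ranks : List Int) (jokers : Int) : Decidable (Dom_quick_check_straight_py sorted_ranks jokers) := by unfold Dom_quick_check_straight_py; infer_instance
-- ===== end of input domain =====

-- B replaces A's "for each candidate high card, redo five membership scans" search by a single
-- two-pointer sliding window over the ascending unique ranks (objective: alternative algorithm).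

-- ===== PORT A =====
-- inner loop: needed = number of i in range(5) with (high - i) not in unique_with_low
def aNeeded (uwl : List Int) (high : Int) : Int :=
  (PySem.List.pyRange 0 5 1).foldl (fun acc i => if (high - i) ∈ uwl then acc else acc + 1) 0

-- outer loop over start_idx (high = unique_with_low[start_idx], i.e. the elements in order), early return True
def aGo (uwl : List Int) (jokers : Int) : List Int → Bool
  | [] => false
  | h :: t => if aNeeded uwl h ≤ jokers then true else aGo uwl jokers t

def quick_check_straight_py (sorted_ranks : List Int) (jokers : Int) : Bool :=
  if (sorted_ranks.length : Int) + jokers < 5 then false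
  else
    let unique := PySem.List.sorted (PySem.Set.ofList sorted_ranks) (fun x => x) true
    let unique_with_low := if (14 : Int) ∈ unique then unique ++ [(1 : Int)] else unique
    aGo unique_with_low jokers unique_with_low

-- ===== PORT B =====
-- while r + 1 < len(asc) and asc[r+1] - asc[l] <= 4: r += 1
def bAdvance (asc : List Int) (base : Int) (r : Nat) : Nat :=
  if h : r + 1 < asc.length then
    if asc[r + 1] - base ≤ 4 then bAdvance asc base (r + 1) else r
  else r
termination_by asc.length - r

-- one iteration of the for-l loop, state = (r, best); asc[l] read with getD (l is always in range)
def bStep (asc : List Int) (st : Nat × Nat) (l : Nat) : Nat × Nat :=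
  let r0 := if st.1 < l then l else st.1
  let r := bAdvance asc (asc.getD l 0) r0
  (r, if st.2 < r - l + 1 then r - l + 1 else st.2)

def quick_check_straight_py_alt (sorted_ranks : List Int) (jokers : Int) : Bool :=
  if sorted_ranks.isEmpty || (sorted_ranks.length : Int) + jokers < 5 then false
  else
    let ranks := PySem.Set.ofList sorted_ranks
    let ranks2 := if (14 : Int) ∈ ranks then PySem.Set.add ranks 1 else ranks
    let asc := PySem.List.sorted ranks2 (fun x => x) false
    let best := ((List.range asc.length).foldl (bStep asc) (0, 0)).2
    decide ((5 : Int) - (best : Int) ≤ jokers)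

-- ===== PRECONDITION & SPEC =====
def Spec_quick_check_straight_py (sorted_ranks : List Int) (jokers : Int) (out : Bool) : Prop := out = quick_check_straight_py_alt sorted_ranks jokers
instance (sorted_ranks : List Int) (jokers : Int) (out : Bool) : Decidable (Spec_quick_check_straight_py sorted_ranks jokers out) := by unfold Spec_quick_check_straight_py; infer_instance

-- ===== CLAIM (what is proved, stated in full; the proofs are below) =====
def Claim_equal_quick_check_straight_py : Prop := ∀ (sorted_ranks : List Int) (jokers : Int), Dom_quick_check_straight_py sorted_ranks jokers → Spec_quick_check_straight_py sorted_ranks jokers (quick_check_straight_py sorted_ranks jokers)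

-- ===== LEMMAS AND PROOFS =====

-- number of elements of L lying in the closed window [a, a+4]
def cntW (L : List Int) (a : Int) : Nat := L.countP (fun x => decide (a ≤ x ∧ x ≤ a + 4))

theorem aGo_eq_any (uwl : List Int) (j : Int) (L : List Int) :
    aGo uwl j L = L.any (fun h => decide (aNeeded uwl h ≤ j)) := by
  induction L with
  | nil => rfl
  | cons h t ih => simp only [aGo, List.any_cons]; split_ifs with hc <;> simp [hc, ih]

theorem aNeeded_eq (uwl : List Int) (h : Int) :
    aNeeded uwl h = 5 - (([h - 4, h - 3, h - 2, h - 1, h].countP (fun x => decide (x ∈ uwl))) : Int) := by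
  have e : PySem.List.pyRange 0 5 1 = [0, 1, 2, 3, 4] := rfl
  simp only [aNeeded, e, List.foldl, List.countP, List.countP.go]
  have e0 : h - (0 : Int) = h := by ring
  rw [e0]
  split_ifs <;> simp_all

-- swap which list is filtered: for nodup lists, |{x ∈ M : x ∈ L}| = |{x ∈ L : x ∈ M}|
theorem countP_mem_comm (L M : List Int) (hL : L.Nodup) (hM : M.Nodup) :
    M.countP (fun x => decide (x ∈ L)) = L.countP (fun x => decide (x ∈ M)) := by
  rw [List.countP_eq_length_filter, List.countP_eq_length_filter]
  have h1 : (M.filter (fun x => decide (x ∈ L))).Nodup := hM.filter _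
  have h2 : (L.filter (fun x => decide (x ∈ M))).Nodup := hL.filter _
  rw [← List.toFinset_card_of_nodup h1, ← List.toFinset_card_of_nodup h2]
  congr 1
  ext x
  simp [And.comm]

theorem cnt_hi_eq_cntW (L : List Int) (hL : L.Nodup) (h : Int) :
    ([h - 4, h - 3, h - 2, h - 1, h].countP (fun x => decide (x ∈ L))) = cntW L (h - 4) := by
  rw [countP_mem_comm L [h - 4, h - 3, h - 2, h - 1, h] hL (by simp)]
  apply List.countP_congr
  intro x _
  simp only [List.mem_cons, List.not_mem_nil, or_false, decide_eq_true_eq]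
  omega

-- shuttle: a high-anchored window achieving the bound exists iff a low-anchored one does
theorem shuttle (L : List Int) (j : Int) :
    (∃ h ∈ L, (5 : Int) - (cntW L (h - 4) : Int) ≤ j) ↔
      (∃ a ∈ L, (5 : Int) - (cntW L a : Int) ≤ j) := by
  constructor
  · rintro ⟨h, hmem, hle⟩
    set F := L.filter (fun x => decide (h - 4 ≤ x ∧ x ≤ h)) with hF
    have hhF : h ∈ F := by simp [hF, List.mem_filter, hmem]
    obtain ⟨a, ha⟩ : ∃ a, F.min? = some a := by
      cases e : F.min? with
      | none => rw [List.min?_eq_none_iff] at e; rw [e] at hhF; simp at hhF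
      | some a => exact ⟨a, rfl⟩
    rw [List.min?_eq_some_iff] at ha
    obtain ⟨haF, hamin⟩ := ha
    have haL : a ∈ L := (List.mem_filter.1 haF).1
    have haw : h - 4 ≤ a ∧ a ≤ h := by
      have := (List.mem_filter.1 haF).2; simpa using this
    refine ⟨a, haL, ?_⟩
    have hmono : cntW L (h - 4) ≤ cntW L a := by
      apply List.countP_mono_left
      intro x hxL hx
      simp only [decide_eq_true_eq] at hx ⊢
      have hxF : x ∈ F := by simp [hF, List.mem_filter, hxL]; omega
      have := hamin x hxF
      omega
    omega
  · rintro ⟨a, hmem, hle⟩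
    set F := L.filter (fun x => decide (a ≤ x ∧ x ≤ a + 4)) with hF
    have haF : a ∈ F := by simp [hF, List.mem_filter, hmem]
    obtain ⟨h, hh⟩ : ∃ h, F.max? = some h := by
      cases e : F.max? with
      | none => rw [List.max?_eq_none_iff] at e; rw [e] at haF; simp at haF
      | some h => exact ⟨h, rfl⟩
    rw [List.max?_eq_some_iff] at hh
    obtain ⟨hhF, hhmax⟩ := hh
    have hhL : h ∈ L := (List.mem_filter.1 hhF).1
    have hhw : a ≤ h ∧ h ≤ a + 4 := by
      have := (List.mem_filter.1 hhF).2; simpa using this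
    refine ⟨h, hhL, ?_⟩
    have hmono : cntW L a ≤ cntW L (h - 4) := by
      apply List.countP_mono_left
      intro x hxL hx
      simp only [decide_eq_true_eq] at hx ⊢
      have hxF : x ∈ F := by simp [hF, List.mem_filter, hxL]; omega
      have := hhmax x hxF
      omega
    omega

theorem bAdvance_spec (L : List Int) (base : Int) (r : Nat) (hr : r < L.length)
    (h0 : L[r]'hr - base ≤ 4) :
    r ≤ bAdvance L base r ∧ ∃ hlt : bAdvance L base r < L.length,
      L[bAdvance L base r]'hlt - base ≤ 4 ∧
      (∀ hlt2 : bAdvance L base r + 1 < L.length, ¬ L[bAdvance L base r + 1]'hlt2 - base ≤ 4) := by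
  fun_induction bAdvance L base r with
  | case1 r h hle ih =>
    obtain ⟨h1, h2⟩ := ih h hle
    exact ⟨Nat.le_trans (Nat.le_succ r) h1, h2⟩
  | case2 r h hgt =>
    exact ⟨Nat.le_refl _, hr, h0, fun hlt2 => hgt⟩
  | case3 r h =>
    exact ⟨Nat.le_refl _, hr, h0, fun hlt2 => absurd hlt2 h⟩

-- monotone access to a strictly sorted list
theorem sorted_getElem_mono (L : List Int) (hs : L.Pairwise (· < ·)) (i j : Nat)
    (hi : i < L.length) (hj : j < L.length) (hij : i ≤ j) : L[i]'hi ≤ L[j]'hj := by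
  rcases Nat.lt_or_ge i j with hlt | hge
  · exact le_of_lt (List.pairwise_iff_getElem.1 hs i j hi hj hlt)
  · have : i = j := Nat.le_antisymm hij hge
    subst this; exact le_refl _

theorem window_count (L : List Int) (hs : L.Pairwise (· < ·)) (l r : Nat) (hlr : l ≤ r)
    (hr : r < L.length) (h4 : L[r]'hr - (L[l]'(lt_of_le_of_lt hlr hr)) ≤ 4)
    (hmax : ∀ h2 : r + 1 < L.length, ¬ L[r + 1]'h2 - (L[l]'(lt_of_le_of_lt hlr hr)) ≤ 4) :
    cntW L (L[l]'(lt_of_le_of_lt hlr hr)) = r + 1 - l := by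
  have hl : l < L.length := lt_of_le_of_lt hlr hr
  have hmono := List.pairwise_iff_getElem.1 hs
  set a := L[l]'hl with ha
  have key : ∀ (i : Nat) (hi : i < L.length), (a ≤ L[i]'hi ∧ L[i]'hi ≤ a + 4) ↔ (l ≤ i ∧ i ≤ r) := by
    intro i hi
    constructor
    · rintro ⟨h1, h2⟩
      constructor
      · by_contra hcon
        push_neg at hcon
        have := hmono i l hi hl hcon
        omega
      · by_contra hcon
        push_neg at hcon
        have hi1 : r + 1 < L.length := Nat.lt_of_le_of_lt hcon hi
        have := hmax hi1
        have := sorted_getElem_mono L hs (r + 1) i hi1 hi hcon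
        omega
    · rintro ⟨h1, h2⟩
      have := sorted_getElem_mono L hs l i hl hi h1
      have := sorted_getElem_mono L hs i r hi hr h2
      omega
  have hdecomp : L = L.take l ++ ((L.drop l).take (r + 1 - l) ++ (L.drop l).drop (r + 1 - l)) := by
    rw [List.take_append_drop, List.take_append_drop]
  rw [cntW]
  conv_lhs => rw [hdecomp]
  rw [List.countP_append, List.countP_append]
  have c1 : (L.take l).countP (fun x => decide (a ≤ x ∧ x ≤ a + 4)) = 0 := by
    rw [List.countP_eq_zero]
    intro x hx
    obtain ⟨i, hi, hxe⟩ := List.mem_iff_getElem.1 hx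
    have hi' : i < L.length := by
      have := hi; rw [List.length_take] at this; omega
    have hil : i < l := by
      have := hi; rw [List.length_take] at this; omega
    rw [List.getElem_take] at hxe
    subst hxe
    simp only [decide_eq_true_eq]
    intro hcc
    have := (key i hi').1 hcc
    omega
  have c2 : ((L.drop l).take (r + 1 - l)).countP (fun x => decide (a ≤ x ∧ x ≤ a + 4)) = ((L.drop l).take (r + 1 - l)).length := by
    rw [List.countP_eq_length]
    intro x hx
    obtain ⟨i, hi, hxe⟩ := List.mem_iff_getElem.1 hx
    rw [List.getElem_take, List.getElem_drop] at hxe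
    have hi2 : i < r + 1 - l := by
      have := hi; simp [List.length_take, List.length_drop] at this; omega
    have hi' : l + i < L.length := by
      have := hi; simp [List.length_take, List.length_drop] at this; omega
    subst hxe
    simp only [decide_eq_true_eq]
    exact (key (l + i) hi').2 ⟨by omega, by omega⟩
  have c3 : ((L.drop l).drop (r + 1 - l)).countP (fun x => decide (a ≤ x ∧ x ≤ a + 4)) = 0 := by
    rw [List.drop_drop, List.countP_eq_zero]
    intro x hx
    obtain ⟨i, hi, hxe⟩ := List.mem_iff_getElem.1 hx
    rw [List.getElem_drop] at hxe
    have hi' : l + (r + 1 - l) + i < L.length := by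
      have := hi; simp [List.length_drop] at this; omega
    subst hxe
    simp only [decide_eq_true_eq]
    intro hcc
    have := (key _ hi').1 hcc
    omega
  rw [c1, c2, c3]
  simp [List.length_take, List.length_drop]
  omega

theorem bStep_spec (L : List Int) (hs : L.Pairwise (· < ·)) (st : Nat × Nat) (l : Nat)
    (hl : l < L.length) (hpre : st.1 < L.length)
    (hpre2 : l ≤ st.1 → L[st.1]'hpre - L.getD l 0 ≤ 4) :
    ∃ hlt : (bStep L st l).1 < L.length,
      l ≤ (bStep L st l).1 ∧
      L[(bStep L st l).1]'hlt - L.getD l 0 ≤ 4 ∧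
      (∀ h2 : (bStep L st l).1 + 1 < L.length, ¬ L[(bStep L st l).1 + 1]'h2 - L.getD l 0 ≤ 4) ∧
      (bStep L st l).2 = max st.2 (cntW L (L.getD l 0)) := by
  have hgd : L.getD l 0 = L[l]'hl := List.getD_eq_getElem L 0 hl
  obtain ⟨hr0, hlr0, hb0⟩ :
      (if st.1 < l then l else st.1) < L.length ∧ l ≤ (if st.1 < l then l else st.1) ∧
        L[(if st.1 < l then l else st.1)]'(by split_ifs <;> [exact hl; exact hpre]) - L.getD l 0 ≤ 4 := by
    by_cases hc : st.1 < l
    · refine ⟨by simp [hc, hl], by simp [hc], ?_⟩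
      simp only [if_pos hc]
      rw [hgd]; omega
    · refine ⟨by simp [hc, hpre], by simp [hc]; omega, ?_⟩
      simp only [if_neg hc]
      exact hpre2 (by omega)
  obtain ⟨hadv1, hadv2, hadv3, hadv4⟩ :=
    bAdvance_spec L (L.getD l 0) (if st.1 < l then l else st.1) hr0 hb0
  have hlle : l ≤ bAdvance L (L.getD l 0) (if st.1 < l then l else st.1) := le_trans hlr0 hadv1
  have hcnt : cntW L (L.getD l 0) = bAdvance L (L.getD l 0) (if st.1 < l then l else st.1) + 1 - l := by
    conv_lhs => rw [hgd]
    exact window_count L hs l (bAdvance L (L.getD l 0) (if st.1 < l then l else st.1)) hlle hadv2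
      (by rw [← hgd]; exact hadv3) (by intro h2; rw [← hgd]; exact hadv4 h2)
  show ∃ hlt : bAdvance L (L.getD l 0) (if st.1 < l then l else st.1) < L.length, _
  refine ⟨hadv2, hlle, hadv3, fun h2 => hadv4 h2, ?_⟩
  show (if st.2 < bAdvance L (L.getD l 0) (if st.1 < l then l else st.1) - l + 1
      then bAdvance L (L.getD l 0) (if st.1 < l then l else st.1) - l + 1 else st.2) =
    max st.2 (cntW L (L.getD l 0))
  rw [hcnt]
  have h' := hlle
  generalize (bAdvance L (L.getD l 0) (if st.1 < l then l else st.1)) = R at h' ⊢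
  split_ifs <;> omega

-- invariant of the for-l fold
theorem bFold_inv (L : List Int) (hs : L.Pairwise (· < ·)) (k : Nat) (hk : k ≤ L.length) (h0 : 0 < k) :
    (∃ hlt : ((List.range k).foldl (bStep L) (0, 0)).1 < L.length,
        L[((List.range k).foldl (bStep L) (0, 0)).1]'hlt - L.getD (k - 1) 0 ≤ 4) ∧
    (∀ l < k, cntW L (L.getD l 0) ≤ ((List.range k).foldl (bStep L) (0, 0)).2) ∧
    (∃ l < k, cntW L (L.getD l 0) = ((List.range k).foldl (bStep L) (0, 0)).2) := by
  induction k with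
  | zero => omega
  | succ k ih =>
    rcases Nat.eq_zero_or_pos k with hk0 | hkpos
    · subst hk0
      have hl0 : 0 < L.length := by omega
      simp only [show (0:Nat)+1 = 1 from rfl, List.range_one, List.foldl_cons, List.foldl_nil]
      obtain ⟨hlt, hge, h3, h4, h5⟩ := bStep_spec L hs (0, 0) 0 hl0 hl0
        (by intro _; rw [List.getD_eq_getElem L 0 hl0]
            show L[0]'hl0 - L[0]'hl0 ≤ 4
            omega)
      refine ⟨⟨hlt, h3⟩, ?_, ?_⟩
      · intro l hl
        have : l = 0 := by omega
        subst this
        rw [h5]; omega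
      · exact ⟨0, by omega, by rw [h5]; omega⟩
    · have hkle : k ≤ L.length := by omega
      have hkl : k < L.length := by omega
      obtain ⟨⟨hlt, hwin⟩, hmax, hach⟩ := ih hkle hkpos
      rw [List.range_succ, List.foldl_append, List.foldl_cons, List.foldl_nil]
      set st := (List.range k).foldl (bStep L) (0, 0) with hstdef
      have hpre2 : k ≤ st.1 → L[st.1]'hlt - L.getD k 0 ≤ 4 := by
        intro _
        have h1 : L.getD (k - 1) 0 ≤ L.getD k 0 := by
          rw [List.getD_eq_getElem L 0 (by omega : k - 1 < L.length), List.getD_eq_getElem L 0 hkl]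
          exact sorted_getElem_mono L hs (k - 1) k (by omega) hkl (by omega)
        omega
      obtain ⟨hlt', hge', h3, h4, h5⟩ := bStep_spec L hs st k hkl hlt hpre2
      refine ⟨⟨hlt', by simpa using h3⟩, ?_, ?_⟩
      · intro l hl
        rw [h5]
        rcases Nat.lt_or_ge l k with hc | hc
        · exact le_trans (hmax l hc) (le_max_left _ _)
        · have : l = k := by omega
          subst this
          exact le_max_right _ _
      · rw [h5]
        rcases Nat.lt_or_ge st.2 (cntW L (L.getD k 0)) with hc | hc
        · exact ⟨k, by omega, by omega⟩
        · obtain ⟨l0, hl0, he⟩ := hach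
          exact ⟨l0, by omega, by rw [he]; omega⟩

-- the element sets of A's unique_with_low and B's asc coincide
theorem mem_uwl_iff (xs : List Int) (x : Int) :
    (x ∈ (if (14 : Int) ∈ PySem.List.sorted (PySem.Set.ofList xs) (fun x => x) true
          then PySem.List.sorted (PySem.Set.ofList xs) (fun x => x) true ++ [(1 : Int)]
          else PySem.List.sorted (PySem.Set.ofList xs) (fun x => x) true)) ↔
      (x ∈ PySem.List.sorted
          (if (14 : Int) ∈ PySem.Set.ofList xs
           then PySem.Set.add (PySem.Set.ofList xs) 1 else PySem.Set.ofList xs)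
          (fun x => x) false) := by
  split_ifs with h1 h2 h2 <;>
    simp_all [PySem.List.mem_sorted, PySem.Set.mem_add, PySem.Set.mem_ofList]

-- ===== VERDICT (by name: the statement is the Claim_ definition above) =====
theorem quick_check_straight_py_spec : Claim_equal_quick_check_straight_py := by
  intro xs j _
  unfold Spec_quick_check_straight_py quick_check_straight_py quick_check_straight_py_alt
  by_cases hlen : (xs.length : Int) + j < 5
  · simp [hlen]
  · rcases eq_or_ne xs [] with rfl | hne
    · rw [if_neg hlen]
      rfl
    · have hEmp : xs.isEmpty = false := by simpa [List.isEmpty_iff] using hne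
      have hlenb : decide ((xs.length : Int) + j < 5) = false := by simpa using hlen
      simp only [hEmp, hlenb, Bool.false_or, Bool.false_eq_true, if_false, if_neg hlen]
      set u := PySem.List.sorted (PySem.Set.ofList xs) (fun x => x) true with hu
      set uwl := (if (14 : Int) ∈ u then u ++ [(1 : Int)] else u) with huwl
      set R2 := (if (14 : Int) ∈ PySem.Set.ofList xs then PySem.Set.add (PySem.Set.ofList xs) 1 else PySem.Set.ofList xs) with hR2
      set asc := PySem.List.sorted R2 (fun x => x) false with hasc
      have hmemu : ∀ x : Int, x ∈ u ↔ x ∈ xs := fun x => by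
        rw [hu, PySem.List.mem_sorted, PySem.Set.mem_ofList]
      have h14 : ((14 : Int) ∈ u) ↔ ((14 : Int) ∈ PySem.Set.ofList xs) := by
        rw [hmemu 14, PySem.Set.mem_ofList]
      have hmem : ∀ x : Int, x ∈ uwl ↔ x ∈ asc := fun x => mem_uwl_iff xs x
      have hndR2 : R2.Nodup := by
        rw [hR2]; split_ifs
        · exact PySem.Set.nodup_add _ _ (PySem.Set.nodup_ofList xs)
        · exact PySem.Set.nodup_ofList xs
      have hndasc : asc.Nodup := by
        rw [hasc]
        exact ((PySem.List.sorted_perm R2 (fun x => x) false).nodup_iff).2 hndR2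
      have hpw : asc.Pairwise (· < ·) := by
        have h1 : asc.Pairwise (fun a b => a ≤ b) := by
          rw [hasc]; exact PySem.List.sorted_pairwise R2 (fun x => x)
        have h2 : asc.Pairwise (fun a b => a ≠ b) := hndasc
        exact (h1.and h2).imp (fun hab => lt_of_le_of_ne hab.1 hab.2)
      have hascne : asc ≠ [] := by
        obtain ⟨y, hy⟩ := List.exists_mem_of_ne_nil xs hne
        have hyR2 : y ∈ R2 := by
          rw [hR2]; split_ifs with hc
          · exact (PySem.Set.mem_add _ _ _).2 (Or.inl ((PySem.Set.mem_ofList xs y).2 hy))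
          · exact (PySem.Set.mem_ofList xs y).2 hy
        have : y ∈ asc := by rw [hasc, PySem.List.mem_sorted]; exact hyR2
        exact List.ne_nil_of_mem this
      have hn : 0 < asc.length := List.length_pos_iff.2 hascne
      rw [aGo_eq_any]
      have hcc : ∀ h : Int,
          ([h - 4, h - 3, h - 2, h - 1, h].countP (fun x => decide (x ∈ uwl))) = cntW asc (h - 4) := by
        intro h
        rw [← cnt_hi_eq_cntW asc hndasc h]
        apply List.countP_congr
        intro x _
        simpa using hmem x
      have hA : (uwl.any (fun h => decide (aNeeded uwl h ≤ j)) = true) ↔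
          ∃ h ∈ asc, (5 : Int) - (cntW asc (h - 4) : Int) ≤ j := by
        rw [List.any_eq_true]
        constructor
        · rintro ⟨h, hh, hp⟩
          rw [decide_eq_true_eq, aNeeded_eq, hcc h] at hp
          exact ⟨h, (hmem h).1 hh, by omega⟩
        · rintro ⟨h, hh, hp⟩
          refine ⟨h, (hmem h).2 hh, ?_⟩
          rw [decide_eq_true_eq, aNeeded_eq, hcc h]
          omega
      obtain ⟨-, hmax, hach⟩ := bFold_inv asc hpw asc.length (le_refl _) hn
      have hB : ((5 : Int) - (((List.range asc.length).foldl (bStep asc) (0, 0)).2 : Int) ≤ j) ↔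
          ∃ a ∈ asc, (5 : Int) - (cntW asc a : Int) ≤ j := by
        constructor
        · intro hle
          obtain ⟨l0, hl0, he⟩ := hach
          refine ⟨asc.getD l0 0, ?_, ?_⟩
          · rw [List.getD_eq_getElem asc 0 hl0]; exact List.getElem_mem hl0
          · rw [he]; omega
        · rintro ⟨a, ha, hle⟩
          obtain ⟨l0, hl0, hae⟩ := List.mem_iff_getElem.1 ha
          have hm := hmax l0 hl0
          rw [List.getD_eq_getElem asc 0 hl0, hae] at hm
          omega
      rw [Bool.eq_iff_iff, decide_eq_true_eq]
      exact hA.trans ((shuttle asc j).trans hB.symm)
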